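-- pv_equiv track=rewrite | github.com/cwaltz/EPIJudge | epi_judge_python/nearest_repeated_entries.py | find_nearest_repetition
-- ===== SOURCE A (Python) =====
-- from typing import cast
--
-- def find_nearest_repetition(paragraph: list[str]) -> int:
--     """
--     #12.5
--
--     Time complexity = O(n), where n is the array length.
--     Space complexity = O(d), where d is the number of distinct entries in the
--         array.
--
--     Test PASSED (505/505) [   5 us]
--     Average running time:   17 us
--     Median running time:     9 us
--     """
--     last_index_of_word: dict[str, int] = {}
--     minimum_distance = float('inf')
--     for index, word in enumerate(paragraph):
--         if word in last_index_of_word: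
--             if index - last_index_of_word[word] < minimum_distance:
--                 minimum_distance = index - last_index_of_word[word]
--         last_index_of_word[word] = index
--     return cast(int, minimum_distance) if minimum_distance != float('inf') \
--         else -1
-- ===== SOURCE B (Python) =====
-- def find_nearest_repetition(paragraph: list[str]) -> int:
--     positions: dict[str, list[int]] = {}
--     for index, word in enumerate(paragraph):
--         positions.setdefault(word, []).append(index)
--     best = None
--     for idx_list in positions.values():
--         for prev, cur in zip(idx_list, idx_list[1:]):
--             gap = cur - prev
--             if best is None or gap < best:
--                 best = gap
--     return best if best is not None else -1
-- ===== Notes on version B (the rewrite author's own statement) =====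
-- stated objective: alternative
-- what changed: Replaces the single-pass last-index-seen dict with running minimum by a two-phase algorithm: first group all occurrence indices per word into a dict of position lists, then scan each word's consecutive gaps for the global minimum.
import Mathlib
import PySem

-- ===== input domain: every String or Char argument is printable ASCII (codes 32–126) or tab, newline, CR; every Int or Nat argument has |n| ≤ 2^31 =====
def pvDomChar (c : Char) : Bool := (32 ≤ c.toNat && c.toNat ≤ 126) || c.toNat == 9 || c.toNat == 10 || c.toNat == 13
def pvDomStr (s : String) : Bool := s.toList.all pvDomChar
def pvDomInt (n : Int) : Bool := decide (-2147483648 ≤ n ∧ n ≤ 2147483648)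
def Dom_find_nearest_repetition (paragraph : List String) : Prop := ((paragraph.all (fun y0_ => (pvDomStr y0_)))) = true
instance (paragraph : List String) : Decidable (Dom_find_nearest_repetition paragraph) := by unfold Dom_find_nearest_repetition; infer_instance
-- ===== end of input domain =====

-- B replaces A's one-pass last-index-seen scan by a two-phase grouping algorithm (dict of all
-- occurrence indices per word, then a consecutive-gap scan per word); same cost, different structure.

-- ===== PORT A =====
-- A's comparison 'index - last < minimum_distance' where minimum_distance starts as float('inf'):
-- none models inf, so the comparison is true whenever minimum_distance is still inf.
def aLtInf (g : Int) (m : Option Int) : Bool :=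
  match m with
  | none => true
  | some mv => decide (g < mv)

-- one iteration of A's loop: state = (last_index_of_word, minimum_distance)
def aStep (s : PySem.Dict String Int × Option Int) (p : Int × String) :
    PySem.Dict String Int × Option Int :=
  let m :=
    match s.1.get? p.2 with
    | some j => if aLtInf (p.1 - j) s.2 then some (p.1 - j) else s.2
    | none => s.2
  (s.1.insert p.2 p.1, m)

def find_nearest_repetition (paragraph : List String) : Int :=
  match ((PySem.List.enumerate paragraph).foldl aStep (PySem.Dict.empty, none)).2 with
  | some v => v
  | none => -1

-- ===== PORT B =====
-- inner loop of B: fold the consecutive gaps of one word's index list into the running best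
def bInner (best : Option Int) (idxList : List Int) : Option Int :=
  (idxList.zip (PySem.List.slice idxList (some 1) none)).foldl
    (fun b pc =>
      let gap := pc.2 - pc.1
      if b.isNone || decide (gap < b.getD 0) then some gap else b)
    best

def find_nearest_repetition_alt (paragraph : List String) : Int :=
  match (((PySem.List.enumerate paragraph).foldl
      (fun d p => d.modify p.2 [] (fun l => l ++ [p.1])) PySem.Dict.empty).values.foldl
        bInner none) with
  | some v => v
  | none => -1

-- ===== PRECONDITION & SPEC =====
def Spec_find_nearest_repetition (paragraph : List String) (out : Int) : Prop := out = find_nearest_repetition_alt paragraph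
instance (paragraph : List String) (out : Int) : Decidable (Spec_find_nearest_repetition paragraph out) := by unfold Spec_find_nearest_repetition; infer_instance

-- ===== CLAIM (what is proved, stated in full; the proofs are below) =====
def Claim_equal_find_nearest_repetition : Prop := ∀ (paragraph : List String), Dom_find_nearest_repetition paragraph → Spec_find_nearest_repetition paragraph (find_nearest_repetition paragraph)

-- ===== LEMMAS AND PROOFS =====

-- the common minimum-update both loops perform
def upd (b : Option Int) (g : Int) : Option Int :=
  match b with
  | none => some g
  | some bv => if g < bv then some g else some bv

-- occurrence indices of word w in xs, in order
def occ (xs : List String) (w : String) : List Int :=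
  ((PySem.List.enumerate xs).filter (fun p => p.2 == w)).map (·.1)

-- consecutive gaps of an index list
def gapsOf (l : List Int) : List Int :=
  (l.zip l.tail).map (fun p => p.2 - p.1)

-- all gaps, grouped per distinct word in first-occurrence order
def allGaps (xs : List String) : List Int :=
  ((PySem.Set.ofList xs).map (fun w => gapsOf (occ xs w))).flatten

theorem upd_some (v g : Int) : upd (some v) g = some (min v g) := by
  simp only [upd]
  split_ifs with h <;> simp [min_def] <;> omega

theorem upd_rcomm : ∀ (b : Option Int) (g1 g2 : Int), upd (upd b g1) g2 = upd (upd b g2) g1 := by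
  intro b g1 g2
  rcases b with _ | bv
  · show upd (some g1) g2 = upd (some g2) g1
    rw [upd_some, upd_some, min_comm]
  · rw [upd_some, upd_some, upd_some, upd_some, min_right_comm]

theorem foldl_upd_perm {l1 l2 : List Int} (h : l1.Perm l2) (b : Option Int) :
    l1.foldl upd b = l2.foldl upd b := by
  haveI : RightCommutative upd := ⟨fun b g1 g2 => upd_rcomm b g1 g2⟩
  exact h.foldl_eq b

theorem aStep_snd (s : PySem.Dict String Int × Option Int) (p : Int × String) :
    (aStep s p).2 = match s.1.get? p.2 with
      | some j => upd s.2 (p.1 - j)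
      | none => s.2 := by
  rcases s with ⟨d, m⟩
  rcases h : d.get? p.2 with _ | j <;> rcases m with _ | mv <;>
    simp [aStep, aLtInf, upd, h]

theorem bInner_eq (b : Option Int) (l : List Int) :
    bInner b l = (gapsOf l).foldl upd b := by
  simp only [bInner, gapsOf, PySem.List.slice_from_one, List.foldl_map]
  have : (fun (b : Option Int) (pc : Int × Int) =>
      let gap := pc.2 - pc.1
      if b.isNone || decide (gap < b.getD 0) then some gap else b)
      = fun b pc => upd b (pc.2 - pc.1) := by
    funext b pc
    rcases b with _ | bv <;> simp [upd]
  rw [this]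

theorem occ_append (xs : List String) (y w : String) :
    occ (xs ++ [y]) w = occ xs w ++ (if y = w then [(xs.length : Int)] else []) := by
  simp only [occ, PySem.List.enumerate_append, PySem.List.enumerate_cons,
    PySem.List.enumerate_nil, List.filter_append, List.map_append, zero_add]
  congr 1
  by_cases h : y = w <;> simp [h]

theorem occ_eq_nil_iff (xs : List String) (w : String) : occ xs w = [] ↔ w ∉ xs := by
  constructor
  · intro h hw
    rw [← PySem.List.map_snd_enumerate xs 0] at hw
    obtain ⟨p, hp, hpw⟩ := List.mem_map.mp hw
    simp only [occ, List.map_eq_nil_iff, List.filter_eq_nil_iff] at h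
    exact absurd hpw (by simpa using h p hp)
  · intro hw
    simp only [occ, List.map_eq_nil_iff, List.filter_eq_nil_iff]
    intro p hp
    have : p.2 ∈ xs := by
      rw [← PySem.List.map_snd_enumerate xs 0]; exact List.mem_map_of_mem hp
    simp only [beq_iff_eq]
    exact fun h => hw (h ▸ this)

theorem gapsOf_concat (l : List Int) (n j : Int) (h : l.getLast? = some j) :
    gapsOf (l ++ [n]) = gapsOf l ++ [n - j] := by
  induction l with
  | nil => simp at h
  | cons a t ih =>
    rcases t with _ | ⟨b, t'⟩
    · simp at h; subst h; simp [gapsOf]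
    · have h' : (b :: t').getLast? = some j := by
        rwa [List.getLast?_cons_cons] at h
      have := ih h'
      simp only [gapsOf, List.cons_append, List.tail_cons] at this ⊢
      rw [List.zip_cons_cons, List.map_cons, this, List.zip_cons_cons, List.map_cons,
        List.cons_append]

-- folding the gaps where only word y's list gains one trailing gap x = folding the old gaps, then x
theorem foldl_upd_flatten_extra (S : List String) (y : String) (hS : S.Nodup) (hy : y ∈ S)
    (g : String → List Int) (x : Int) (b : Option Int) :
    ((S.map (fun w => if w = y then g w ++ [x] else g w)).flatten).foldl upd b
      = upd (((S.map g).flatten).foldl upd b) x := by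
  induction S generalizing b with
  | nil => simp at hy
  | cons s S' ih =>
    rcases List.nodup_cons.mp hS with ⟨hs, hS'⟩
    by_cases h : s = y
    · subst h
      have hmap : S'.map (fun w => if w = s then g w ++ [x] else g w) = S'.map g :=
        List.map_congr_left (fun w hw => by
          have : w ≠ s := fun he => hs (he ▸ hw)
          simp [this])
      simp only [List.map_cons, List.flatten_cons, if_true, hmap]
      have hperm : ((g s ++ [x]) ++ (S'.map g).flatten).Perm
          ((g s ++ (S'.map g).flatten) ++ [x]) := by
        simp only [List.append_assoc]
        exact List.Perm.append_left (g s) List.perm_append_comm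
      rw [foldl_upd_perm hperm, List.foldl_append]
      rfl
    · have hy' : y ∈ S' := by
        rcases List.mem_cons.mp hy with h' | h'
        · exact absurd h'.symm h
        · exact h'
      simp only [List.map_cons, List.flatten_cons, if_neg h, List.foldl_append]
      exact ih hS' hy' _

-- A's running dict maps each word to its last occurrence index
theorem A_dict (xs : List String) (w : String) :
    ((PySem.List.enumerate xs).foldl aStep (PySem.Dict.empty, none)).1.get? w
      = (occ xs w).getLast? := by
  induction xs using List.reverseRecOn with
  | nil => simp [PySem.List.enumerate_nil, occ, PySem.Dict.get?_empty]
  | append_singleton xs y ih =>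
    rw [PySem.List.enumerate_append, List.foldl_append, PySem.List.enumerate_cons,
      PySem.List.enumerate_nil]
    simp only [List.foldl_cons, List.foldl_nil, occ_append, zero_add]
    by_cases h : y = w
    · subst h
      simp [aStep, PySem.Dict.get?_insert_self]
    · rw [if_neg h, List.append_nil]
      show (((PySem.List.enumerate xs).foldl aStep (PySem.Dict.empty, none)).1.insert y _).get? w
          = (occ xs w).getLast?
      rw [PySem.Dict.get?_insert_of_ne _ _ (fun he => h he.symm)]
      exact ih

-- A's running minimum is the fold of the per-word consecutive gaps
theorem A_min (xs : List String) :
    ((PySem.List.enumerate xs).foldl aStep (PySem.Dict.empty, none)).2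
      = (allGaps xs).foldl upd none := by
  induction xs using List.reverseRecOn with
  | nil => simp [PySem.List.enumerate_nil, allGaps, PySem.Set.ofList]
  | append_singleton xs y ih =>
    rw [PySem.List.enumerate_append, List.foldl_append, PySem.List.enumerate_cons,
      PySem.List.enumerate_nil]
    simp only [List.foldl_cons, List.foldl_nil, zero_add]
    rw [aStep_snd]
    simp only [A_dict xs y, ih]
    by_cases hmem : y ∈ xs
    · -- y repeats: the new gap is xs.length minus the last previous occurrence of y
      obtain ⟨j, hj⟩ : ∃ j, (occ xs y).getLast? = some j := by
        rcases h : (occ xs y).getLast? with _ | j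
        · exact absurd ((occ_eq_nil_iff xs y).mp (List.getLast?_eq_none_iff.mp h))
            (not_not.mpr hmem)
        · exact ⟨j, rfl⟩
      rw [hj]
      have hyS : y ∈ PySem.Set.ofList xs := (PySem.Set.mem_ofList xs y).mpr hmem
      have hset : PySem.Set.ofList (xs ++ [y]) = PySem.Set.ofList xs := by
        rw [PySem.Set.ofList_append_singleton]
        simp [PySem.Set.add, PySem.Set.contains_eq_listContains, List.contains_eq_mem, hyS]
      have hmap : (PySem.Set.ofList xs).map (fun w => gapsOf (occ (xs ++ [y]) w))
          = (PySem.Set.ofList xs).map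
              (fun w => if w = y then gapsOf (occ xs w) ++ [(xs.length : Int) - j]
                        else gapsOf (occ xs w)) := by
        apply List.map_congr_left
        intro w _
        rw [occ_append]
        by_cases hw : w = y
        · subst hw
          rw [if_pos rfl, if_pos rfl, gapsOf_concat _ _ _ hj]
        · rw [if_neg (fun he => hw he.symm), List.append_nil, if_neg hw]
      show upd ((allGaps xs).foldl upd none) ((xs.length : Int) - j)
          = (allGaps (xs ++ [y])).foldl upd none
      simp only [allGaps, hset, hmap]
      rw [foldl_upd_flatten_extra _ y (PySem.Set.nodup_ofList xs) hyS _ _ none]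
    · -- first occurrence of y: no new gap
      rw [(occ_eq_nil_iff xs y).mpr hmem]
      simp only [List.getLast?_nil]
      have hyS : y ∉ PySem.Set.ofList xs := fun h => hmem ((PySem.Set.mem_ofList xs y).mp h)
      have hset : PySem.Set.ofList (xs ++ [y]) = PySem.Set.ofList xs ++ [y] := by
        rw [PySem.Set.ofList_append_singleton]
        simp [PySem.Set.add, PySem.Set.contains_eq_listContains, List.contains_eq_mem, hyS]
      have hmap : ∀ w ∈ PySem.Set.ofList xs, gapsOf (occ (xs ++ [y]) w) = gapsOf (occ xs w) := by
        intro w hw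
        have : y ≠ w := fun he => hyS (he ▸ hw)
        rw [occ_append, if_neg this, List.append_nil]
      have hy : occ (xs ++ [y]) y = [(xs.length : Int)] := by
        rw [occ_append, (occ_eq_nil_iff xs y).mpr hmem, if_pos rfl, List.nil_append]
      show (allGaps xs).foldl upd none = (allGaps (xs ++ [y])).foldl upd none
      simp only [allGaps, hset, List.map_append, List.map_cons, List.map_nil, hy,
        List.map_congr_left hmap]
      simp [gapsOf]

-- B computes the same fold of the same grouped gaps
theorem B_char (xs : List String) :
    find_nearest_repetition_alt xs
      = match (allGaps xs).foldl upd none with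
        | some v => v
        | none => -1 := by
  unfold find_nearest_repetition_alt
  have hfold : (PySem.List.enumerate xs).foldl
      (fun d p => d.modify p.2 [] (fun l => l ++ [p.1])) PySem.Dict.empty
      = ((PySem.List.enumerate xs).map Prod.swap).foldl
          (fun d p => d.modify p.1 [] (fun l => l ++ [p.2])) PySem.Dict.empty := by
    rw [List.foldl_map]
    rfl
  rw [hfold]
  have hnodup : (((PySem.List.enumerate xs).map Prod.swap).foldl
      (fun d p => d.modify p.1 [] (fun l => l ++ [p.2])) PySem.Dict.empty).keys.Nodup :=
    PySem.Dict.nodup_keys_foldl_modify_key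
      ((PySem.List.enumerate xs).map Prod.swap) (fun p => p.1) []
      (fun _ p => (fun l => l ++ [p.2])) PySem.Dict.empty PySem.Dict.nodup_keys_empty
  rw [PySem.Dict.values_eq_map_keys _ hnodup []]
  have hkeys : (((PySem.List.enumerate xs).map Prod.swap).foldl
      (fun d p => d.modify p.1 [] (fun l => l ++ [p.2])) PySem.Dict.empty).keys
      = PySem.Set.ofList xs := by
    rw [PySem.Dict.keys_foldl_modify_key
      ((PySem.List.enumerate xs).map Prod.swap) (fun p => p.1) []
      (fun _ p => (fun l => l ++ [p.2])) PySem.Dict.empty]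
    have : ((PySem.List.enumerate xs).map Prod.swap).map (fun p => p.1) = xs := by
      rw [List.map_map]
      exact PySem.List.map_snd_enumerate xs 0
    rw [this]
    rfl
  rw [hkeys]
  have hgetD : ∀ w, (((PySem.List.enumerate xs).map Prod.swap).foldl
      (fun d p => d.modify p.1 [] (fun l => l ++ [p.2])) PySem.Dict.empty).getD w []
      = occ xs w := by
    intro w
    rw [PySem.Dict.getD_foldl_modify_append]
    simp only [PySem.Dict.getD_empty, List.nil_append, occ, List.filter_map, List.map_map]
    rfl
  rw [List.map_congr_left (fun w _ => hgetD w)]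
  have : ((PySem.Set.ofList xs).map (fun w => occ xs w)).foldl bInner none
      = (allGaps xs).foldl upd none := by
    rw [show allGaps xs = ((PySem.Set.ofList xs).map (fun w => gapsOf (occ xs w))).flatten from rfl, List.foldl_flatten, List.foldl_map, List.foldl_map]
    have hfun : (fun (b : Option Int) w => bInner b (occ xs w))
        = fun b w => (gapsOf (occ xs w)).foldl upd b :=
      funext fun b => funext fun w => bInner_eq b (occ xs w)
    rw [hfun]
  rw [this]

-- ===== VERDICT (by name: the statement is the Claim_ definition above) =====
theorem find_nearest_repetition_spec : Claim_equal_find_nearest_repetition := by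
  intro paragraph _
  unfold Spec_find_nearest_repetition
  rw [B_char]
  unfold find_nearest_repetition
  rw [A_min]
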